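-- pv_equiv track=rewrite | github.com/luongphambao/coding | leetcode/test1.py | findMaxPoints
-- ===== SOURCE A (Python) =====
-- def findMaxPoints(arr):
--     if len(arr)<3:
--         return arr[0]
--     n=len(arr)
--
--     sum_value=0
--     for i in range(1,n+1,2):
--         sum_arr=sum(arr[0:i])
--         sum_value+=sum_arr
--         for j in range(1,n-i+1):
--             sum_arr=sum_arr-arr[j-1]+arr[j+i-1]
--             sum_value+=sum_arr
--     return sum_value
-- ===== SOURCE B (Python) =====
-- def findMaxPoints(arr):
--     n = len(arr)
--     # prefix sums P of arr, then prefix sums Q of P; the total of all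
--     # windows of size k is Q[n+1] - Q[k] - Q[n-k+1], summed over odd k.
--     P = [0]
--     acc = 0
--     for x in arr:
--         acc += x
--         P.append(acc)
--     Q = [0]
--     acc = 0
--     for p in P:
--         acc += p
--         Q.append(acc)
--     total = 0
--     for k in range(1, n + 1, 2):
--         total += Q[n + 1] - Q[k] - Q[n - k + 1]
--     return total
-- ===== Notes on version B (the rewrite author's own statement) =====
-- stated objective: faster
-- what changed: Replaces A's nested sliding-window loops (recomputing every odd-size window sum) by double prefix sums, reading the total of all windows of one size off in O(1), so B is linear.
-- intended difference: On lists of length exactly 2, A's early return yields arr[0], ignoring the second size-1 window; B returns arr[0]+arr[1], the actual sum of all odd-size window sums, which is the intended value. — e.g. on findMaxPoints([1, 1]): A returns 1, B returns 2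
import Mathlib
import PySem

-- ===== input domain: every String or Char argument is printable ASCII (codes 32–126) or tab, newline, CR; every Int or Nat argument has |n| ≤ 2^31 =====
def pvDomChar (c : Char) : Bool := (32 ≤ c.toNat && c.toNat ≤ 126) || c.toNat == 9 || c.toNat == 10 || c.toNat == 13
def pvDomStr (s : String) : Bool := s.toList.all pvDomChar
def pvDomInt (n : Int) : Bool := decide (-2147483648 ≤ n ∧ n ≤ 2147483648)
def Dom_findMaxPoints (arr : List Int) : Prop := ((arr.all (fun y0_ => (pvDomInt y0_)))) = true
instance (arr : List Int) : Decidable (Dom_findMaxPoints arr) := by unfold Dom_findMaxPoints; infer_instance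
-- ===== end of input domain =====

-- B replaces A's O(n^2) sliding-window accumulation by double prefix sums: the total of
-- all windows of one size is read off in O(1), making B O(n) (objective: faster).

-- ===== PORT A =====
-- arr[0] on the early-return branch: pyGet? is some for arr ≠ [] (Pre_ excludes []),
-- .getD 0 is never the value used inside Pre_. The indices j-1 and j+i-1 in the inner
-- loop are always in range for len(arr) ≥ 3, so pyGetD's default 0 is never read.
def findMaxPoints (arr : List Int) : Int :=
  if arr.length < 3 then (PySem.List.pyGet? arr 0).getD 0
  else
    let n : Int := arr.length
    (PySem.List.pyRange 1 (n + 1) 2).foldl (fun sum_value i =>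
      let sum_arr := (PySem.List.slice arr (some 0) (some i)).sum
      let sum_value := sum_value + sum_arr
      let st := (PySem.List.pyRange 1 (n - i + 1) 1).foldl
        (fun (st : Int × Int) j =>
          let sum_arr := st.1 - PySem.List.pyGetD arr (j - 1) 0
                              + PySem.List.pyGetD arr (j + i - 1) 0
          (sum_arr, st.2 + sum_arr)) (sum_arr, sum_value)
      st.2) 0

-- ===== PORT B =====
-- P = prefix sums of arr, Q = prefix sums of P; the total of all windows of size k is
-- Q[n+1] - Q[k] - Q[n-k+1].  The indices into Q are in range for every k the loop
-- produces, so pyGetD's default 0 is never read.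
def findMaxPoints_alt (arr : List Int) : Int :=
  let n : Int := arr.length
  let P := (arr.foldl (fun (st : Int × List Int) x =>
      (st.1 + x, st.2 ++ [st.1 + x])) (0, [0])).2
  let Q := (P.foldl (fun (st : Int × List Int) p =>
      (st.1 + p, st.2 ++ [st.1 + p])) (0, [0])).2
  (PySem.List.pyRange 1 (n + 1) 2).foldl (fun total k =>
      total + (PySem.List.pyGetD Q (n + 1) 0 - PySem.List.pyGetD Q k 0
               - PySem.List.pyGetD Q (n - k + 1) 0)) 0

-- ===== PRECONDITION & SPEC =====
-- Pre_ excludes only the empty list, on which A raises IndexError (arr[0]).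
def Pre_findMaxPoints (arr : List Int) : Prop := arr ≠ []
instance (arr : List Int) : Decidable (Pre_findMaxPoints arr) := by
  unfold Pre_findMaxPoints; infer_instance
def pvWitness_findMaxPoints : List Int := [1, 2, 3]

-- On lists of length exactly 2 A's early return yields arr[0], ignoring the second
-- size-1 window; B returns arr[0] + arr[1], the actual sum of all odd-size window sums,
-- which is the intended value.
def D_findMaxPoints (arr : List Int) : Prop := arr.length = 2
instance (arr : List Int) : Decidable (D_findMaxPoints arr) := by
  unfold D_findMaxPoints; infer_instance

def Spec_findMaxPoints (arr : List Int) (out : Int) : Prop :=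
  ¬ D_findMaxPoints arr → out = findMaxPoints_alt arr
instance (arr : List Int) (out : Int) : Decidable (Spec_findMaxPoints arr out) := by
  unfold Spec_findMaxPoints; infer_instance

def pvDiffWitness_findMaxPoints : List Int := [1, 1]
def pvDiffWitnessOut_findMaxPoints : Int × Int := (1, 2)

-- ===== CLAIM (what is proved, stated in full; the proofs are below) =====
def Claim_unchanged_findMaxPoints : Prop := ∀ (arr : List Int), Dom_findMaxPoints arr →
  Pre_findMaxPoints arr → Spec_findMaxPoints arr (findMaxPoints arr)
def Claim_changed_findMaxPoints : Prop :=
  Dom_findMaxPoints (pvDiffWitness_findMaxPoints) ∧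
  Pre_findMaxPoints (pvDiffWitness_findMaxPoints) ∧
  D_findMaxPoints (pvDiffWitness_findMaxPoints) ∧
  findMaxPoints (pvDiffWitness_findMaxPoints) = pvDiffWitnessOut_findMaxPoints.1 ∧
  findMaxPoints_alt (pvDiffWitness_findMaxPoints) = pvDiffWitnessOut_findMaxPoints.2 ∧
  pvDiffWitnessOut_findMaxPoints.1 ≠ pvDiffWitnessOut_findMaxPoints.2
-- ===== LEMMAS AND PROOFS =====

-- prefix sum of the first m elements
def pvPre (arr : List Int) (m : Nat) : Int := (arr.take m).sum
-- prefix sum of pvPre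
def pvQre (arr : List Int) (m : Nat) : Int := ∑ t ∈ Finset.range m, pvPre arr t
-- total of all window sums of size k (k ≤ arr.length)
def pvW (arr : List Int) (k : Nat) : Int :=
  ∑ j ∈ Finset.range (arr.length - k + 1), (pvPre arr (j + k) - pvPre arr j)

theorem pvPre_succ (arr : List Int) (t : Nat) :
    pvPre arr (t + 1) = pvPre arr t + arr.getD t 0 := by
  simp only [pvPre, List.take_add_one, List.getD_eq_getElem?_getD, List.sum_append]
  cases h : arr[t]? <;> simp

theorem pvBuildList (l : List Int) (s : Int) (L : List Int) :
    l.foldl (fun (st : Int × List Int) x => (st.1 + x, st.2 ++ [st.1 + x])) (s, L)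
      = (s + l.sum, L ++ (List.range l.length).map (fun m => s + (l.take (m + 1)).sum)) := by
  induction l generalizing s L with
  | nil => simp
  | cons x t ih =>
    simp only [List.foldl_cons, ih (s + x) (L ++ [s + x]), List.length_cons, List.sum_cons,
      List.range_succ_eq_map, List.map_cons, List.map_map]
    rw [Prod.mk.injEq]
    refine ⟨by ring, ?_⟩
    simp only [List.append_assoc, List.singleton_append, Function.comp_def]
    congr 2
    · simp
    · refine List.map_congr_left (fun m _ => ?_)
      rw [show Nat.succ m + 1 = (m + 1) + 1 from rfl, List.take_succ_cons, List.sum_cons]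
      ring

theorem pvRange_one (m : Nat) :
    PySem.List.pyRange 1 ((m : Int) + 1) 1
      = List.map (fun t : Nat => ((t : Int) + 1)) (List.range m) := by
  rw [PySem.List.pyRange_of_pos _ _ (by norm_num)]
  have h : (if (1:Int) < (m:Int) + 1 then (((m:Int) + 1 - 1 + 1 - 1) / 1).toNat else 0) = m := by
    split <;> omega
  rw [h]
  exact List.map_congr_left (fun t _ => by ring)

theorem pvInnerInv (arr : List Int) (k m : Nat) (v : Int) :
    (List.range m).foldl (fun (st : Int × Int) t =>
        (st.1 - arr.getD t 0 + arr.getD (t + k) 0,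
         st.2 + (st.1 - arr.getD t 0 + arr.getD (t + k) 0))) (pvPre arr k, v)
      = (pvPre arr (m + k) - pvPre arr m,
         v + ∑ t ∈ Finset.range m, (pvPre arr (t + 1 + k) - pvPre arr (t + 1))) := by
  induction m with
  | zero => simp [pvPre]
  | succ m ih =>
    rw [List.range_succ, List.foldl_append, ih, List.foldl_cons, List.foldl_nil,
      Finset.sum_range_succ, Prod.mk.injEq]
    have h1 := pvPre_succ arr m
    have h2 := pvPre_succ arr (m + k)
    constructor
    · rw [show m + 1 + k = m + k + 1 from by omega, h1, h2]; ring
    · rw [show m + 1 + k = m + k + 1 from by omega, h1, h2]; ring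

theorem pvW_eq (arr : List Int) (k : Nat) :
    pvW arr k = pvPre arr k
      + ∑ t ∈ Finset.range (arr.length - k), (pvPre arr (t + 1 + k) - pvPre arr (t + 1)) := by
  rw [pvW, Finset.sum_range_succ']
  have h0 : pvPre arr 0 = 0 := rfl
  simp only [Nat.zero_add, h0]
  ring

theorem pvQ_W (arr : List Int) (k : Nat) (hk : k ≤ arr.length) :
    pvQre arr (arr.length + 1) - pvQre arr k - pvQre arr (arr.length - k + 1)
      = pvW arr k := by
  have hsplit : pvQre arr (arr.length + 1)
      = pvQre arr k + ∑ j ∈ Finset.range (arr.length - k + 1), pvPre arr (k + j) := by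
    rw [pvQre, show arr.length + 1 = k + (arr.length - k + 1) from by omega,
      Finset.sum_range_add, pvQre]
  have h2 : pvQre arr (arr.length - k + 1)
      = ∑ j ∈ Finset.range (arr.length - k + 1), pvPre arr j := by rw [pvQre]
  have h3 : ∑ j ∈ Finset.range (arr.length - k + 1), pvPre arr (k + j)
      = ∑ j ∈ Finset.range (arr.length - k + 1), pvPre arr (j + k) :=
    Finset.sum_congr rfl (fun j _ => by rw [Nat.add_comm])
  rw [pvW, Finset.sum_sub_distrib, hsplit, h2, h3]
  ring

theorem pvSumRange (n : Nat) (f : Nat → Int) :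
    ∑ i ∈ Finset.range n, f i = ((List.range n).map f).sum := by
  induction n with
  | zero => simp
  | succ n ih => rw [Finset.sum_range_succ, List.range_succ]; simp [ih]

theorem pvP_char (arr : List Int) :
    (arr.foldl (fun (st : Int × List Int) x => (st.1 + x, st.2 ++ [st.1 + x])) (0, [0])).2
      = (List.range (arr.length + 1)).map (pvPre arr) := by
  rw [pvBuildList]
  simp [List.range_succ_eq_map, Function.comp_def, pvPre]

theorem pvQ_getD (arr : List Int) (i : Nat) (hi : i ≤ arr.length + 1) :
    ((((List.range (arr.length + 1)).map (pvPre arr)).foldl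
        (fun (st : Int × List Int) p => (st.1 + p, st.2 ++ [st.1 + p])) (0, [0])).2).getD i 0
      = pvQre arr i := by
  rw [pvBuildList]
  simp only [List.length_map, List.length_range, List.singleton_append]
  cases i with
  | zero => simp [pvQre]
  | succ j =>
    have hj : j < arr.length + 1 := by omega
    rw [List.getD_cons_succ, PySem.List.getD_map_range _ _ _ _ hj,
      ← List.map_take, List.take_range, show min (j + 1) (arr.length + 1) = j + 1 from by omega,
      pvQre, pvSumRange]
    ring

theorem pvB_char (arr : List Int) :
    findMaxPoints_alt arr
      = (PySem.List.pyRange 1 ((arr.length : Int) + 1) 2).foldl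
          (fun total i => total + pvW arr i.toNat) 0 := by
  simp only [findMaxPoints_alt]
  rw [pvP_char arr]
  refine PySem.List.foldl_congr_mem _ _ _ _ ?_
  intro acc k hk
  rw [PySem.List.mem_pyRange_iff_of_pos (by norm_num)] at hk
  obtain ⟨h1, h2, -⟩ := hk
  have hkk : k = ((k.toNat : Nat) : Int) := by omega
  set kn := k.toNat with hkn
  have hle : kn ≤ arr.length := by omega
  rw [hkk]
  have e1 : ((arr.length : Int) + 1) = ((arr.length + 1 : Nat) : Int) := by push_cast; ring
  have e2 : ((arr.length : Int) - (kn : Int) + 1) = ((arr.length - kn + 1 : Nat) : Int) := by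
    push_cast [hle]; ring
  rw [e1, e2, PySem.List.pyGetD_natCast, PySem.List.pyGetD_natCast, PySem.List.pyGetD_natCast,
    pvQ_getD arr (arr.length + 1) (by omega), pvQ_getD arr kn (by omega),
    pvQ_getD arr (arr.length - kn + 1) (by omega), pvQ_W arr kn hle]

theorem pvA_char (arr : List Int) (h : 3 ≤ arr.length) :
    findMaxPoints arr
      = (PySem.List.pyRange 1 ((arr.length : Int) + 1) 2).foldl
          (fun total i => total + pvW arr i.toNat) 0 := by
  have hn : ¬ arr.length < 3 := by omega
  simp only [findMaxPoints, if_neg hn]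
  refine PySem.List.foldl_congr_mem _ _ _ _ ?_
  intro acc i hi
  rw [PySem.List.mem_pyRange_iff_of_pos (by norm_num)] at hi
  obtain ⟨h1, h2, -⟩ := hi
  have hkk : i = ((i.toNat : Nat) : Int) := by omega
  set kn := i.toNat with hkn
  have hle : kn ≤ arr.length := by omega
  rw [hkk]
  have hs : (PySem.List.slice arr (some 0) (some ((kn : Nat) : Int))).sum = pvPre arr kn := by
    simp [PySem.List.slice_to_natCast, pvPre]
  have hr : ((arr.length : Int) - (kn : Int) + 1) = ((arr.length - kn : Nat) : Int) + 1 := by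
    push_cast [hle]; ring
  rw [hs, hr, pvRange_one, List.foldl_map]
  have hbody : (List.range (arr.length - kn)).foldl
      (fun (st : Int × Int) (t : Nat) =>
        (st.1 - PySem.List.pyGetD arr ((t : Int) + 1 - 1) 0
           + PySem.List.pyGetD arr ((t : Int) + 1 + (kn : Int) - 1) 0,
         st.2 + (st.1 - PySem.List.pyGetD arr ((t : Int) + 1 - 1) 0
           + PySem.List.pyGetD arr ((t : Int) + 1 + (kn : Int) - 1) 0)))
      (pvPre arr kn, acc + pvPre arr kn)
      = (List.range (arr.length - kn)).foldl
      (fun (st : Int × Int) (t : Nat) =>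
        (st.1 - arr.getD t 0 + arr.getD (t + kn) 0,
         st.2 + (st.1 - arr.getD t 0 + arr.getD (t + kn) 0)))
      (pvPre arr kn, acc + pvPre arr kn) := by
    refine PySem.List.foldl_congr_mem _ _ _ _ ?_
    intro st t _
    have e1 : ((t : Int) + 1 - 1) = ((t : Nat) : Int) := by ring
    have e2 : ((t : Int) + 1 + (kn : Int) - 1) = ((t + kn : Nat) : Int) := by push_cast; ring
    rw [e1, e2, PySem.List.pyGetD_natCast, PySem.List.pyGetD_natCast]
  rw [hbody, pvInnerInv]
  simp only [pvW_eq arr kn]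
  ring

-- ===== VERDICT (by name: the statement is the Claim_ definition above) =====
theorem findMaxPoints_spec : Claim_unchanged_findMaxPoints := by
  intro arr _ hpre hD
  rcases arr with _ | ⟨a, rest⟩
  · exact absurd rfl hpre
  rcases rest with _ | ⟨b, rest2⟩
  · -- length 1
    have hpr : PySem.List.pyRange 1 2 2 = [1] := by decide
    have h2 : ((([a] : List Int).length : Int) + 1) = 2 := by norm_num
    rw [pvB_char, h2, hpr]
    simp [findMaxPoints, pvW, pvPre, Finset.sum_range_succ]
  rcases rest2 with _ | ⟨c, rest3⟩
  · -- length 2: inside D_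
    exact absurd rfl hD
  · -- length ≥ 3
    rw [pvA_char _ (by simp), pvB_char]

theorem findMaxPoints_changed : Claim_changed_findMaxPoints := by
  unfold Claim_changed_findMaxPoints; decide
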